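-- pv_equiv track=rewrite | github.com/demuland/ai-systems-orchestration-public | backend/core/schema_discovery.py | _build_type_map
-- ===== SOURCE A (Python) =====
-- def _build_type_map(src_types: list, dst_types: list) -> dict:
--     # Normalize names for comparison
--     ALIASES = {
--         "contacts": ["contacts", "persons", "people"],
--         "companies": ["companies", "organizations", "accounts", "sales_accounts"],
--         "deals": ["deals", "opportunities"],
--     }
--     result = {}
--     for canonical, variants in ALIASES.items():
--         src_match = next((t for t in src_types if t.lower() in variants), None)
--         dst_match = next((t for t in dst_types if t.lower() in variants), None)
--         if src_match and dst_match:
--             result[src_match] = dst_match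
--     return result
-- ===== SOURCE B (Python) =====
-- # Inverted index (lowercase variant -> canonical) + single first-seen-bucket
-- # pass over each input list, then emit in canonical order.
-- VARIANT_TO_CANON = {
--     "contacts": "contacts", "persons": "contacts", "people": "contacts",
--     "companies": "companies", "organizations": "companies",
--     "accounts": "companies", "sales_accounts": "companies",
--     "deals": "deals", "opportunities": "deals",
-- }
-- CANONICALS = ["contacts", "companies", "deals"]
--
--
-- def _build_type_map(src_types: list, dst_types: list) -> dict:
--     src_bucket = {}
--     for t in src_types:
--         c = VARIANT_TO_CANON.get(t.lower())
--         if c is not None and c not in src_bucket: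
--             src_bucket[c] = t
--     dst_bucket = {}
--     for t in dst_types:
--         c = VARIANT_TO_CANON.get(t.lower())
--         if c is not None and c not in dst_bucket:
--             dst_bucket[c] = t
--     result = {}
--     for c in CANONICALS:
--         if c in src_bucket and c in dst_bucket:
--             result[src_bucket[c]] = dst_bucket[c]
--     return result
-- ===== Notes on version B (the rewrite author's own statement) =====
-- stated objective: faster
-- what changed: Replaces the per-canonical rescans of src_types/dst_types (next(...) generator per alias group) with one inverted variant->canonical dict built once and a single first-seen-bucket pass over each input list, then an emit pass in canonical order.
import Mathlib
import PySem

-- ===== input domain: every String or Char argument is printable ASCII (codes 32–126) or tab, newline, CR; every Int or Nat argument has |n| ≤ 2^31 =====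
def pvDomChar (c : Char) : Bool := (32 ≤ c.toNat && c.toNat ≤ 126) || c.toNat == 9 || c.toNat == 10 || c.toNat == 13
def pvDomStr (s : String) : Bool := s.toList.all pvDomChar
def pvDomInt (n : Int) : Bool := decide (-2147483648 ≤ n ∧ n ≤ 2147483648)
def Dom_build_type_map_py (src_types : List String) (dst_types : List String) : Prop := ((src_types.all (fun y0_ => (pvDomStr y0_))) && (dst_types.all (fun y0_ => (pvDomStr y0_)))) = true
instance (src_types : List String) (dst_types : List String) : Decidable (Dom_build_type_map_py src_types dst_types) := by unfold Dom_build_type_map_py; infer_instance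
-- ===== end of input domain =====

-- B replaces A's per-canonical rescans of both input lists by one inverted
-- variant->canonical index and a single first-seen-bucket pass over each list.

-- ===== PORT A =====
-- ALIASES dict of A, as its (canonical, variants) items in insertion order
def pvAliasesA : List (String × List String) :=
  [("contacts", ["contacts", "persons", "people"]),
   ("companies", ["companies", "organizations", "accounts", "sales_accounts"]),
   ("deals", ["deals", "opportunities"])]

def build_type_map_py (src_types : List String) (dst_types : List String) : List (String × String) :=
  (pvAliasesA.foldl (fun result cv =>
      let src_match := src_types.find? (fun t => cv.2.contains (PySem.Str.lower t))
      let dst_match := dst_types.find? (fun t => cv.2.contains (PySem.Str.lower t))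
      match src_match, dst_match with
      | some s, some d =>
          -- Python's 'if src_match and dst_match': None or "" is falsy
          if s.isEmpty || d.isEmpty then result else result.insert s d
      | _, _ => result)
    PySem.Dict.empty).items

-- ===== PORT B =====
-- the inverted index of B: lowercase variant -> canonical (a dict literal)
def pvVariantToCanon : PySem.Dict String String :=
  PySem.Dict.ofList
    [("contacts", "contacts"), ("persons", "contacts"), ("people", "contacts"),
     ("companies", "companies"), ("organizations", "companies"),
     ("accounts", "companies"), ("sales_accounts", "companies"),
     ("deals", "deals"), ("opportunities", "deals")]

def pvCanonicals : List String := ["contacts", "companies", "deals"]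

-- first-seen bucket per canonical (B's single pass over one input list)
def pvBucket (ts : List String) : PySem.Dict String String :=
  ts.foldl (fun b t =>
      match pvVariantToCanon.get? (PySem.Str.lower t) with
      | some c => if b.contains c then b else b.insert c t
      | none => b)
    PySem.Dict.empty

def build_type_map_py_alt (src_types : List String) (dst_types : List String) : List (String × String) :=
  let sb := pvBucket src_types
  let db := pvBucket dst_types
  (pvCanonicals.foldl (fun r c =>
      match sb.get? c with
      | some s =>
        match db.get? c with
        | some d => r.insert s d
        | none => r
      | none => r)
    PySem.Dict.empty).items

-- ===== PRECONDITION & SPEC =====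
def Spec_build_type_map_py (src_types : List String) (dst_types : List String) (out : List (String × String)) : Prop := out = build_type_map_py_alt src_types dst_types
instance (src_types : List String) (dst_types : List String) (out : List (String × String)) : Decidable (Spec_build_type_map_py src_types dst_types out) := by unfold Spec_build_type_map_py; infer_instance

-- ===== CLAIM (what is proved, stated in full; the proofs are below) =====
def Claim_equal_build_type_map_py : Prop := ∀ (src_types : List String) (dst_types : List String), Dom_build_type_map_py src_types dst_types → Spec_build_type_map_py src_types dst_types (build_type_map_py src_types dst_types)

-- ===== LEMMAS AND PROOFS =====

-- B's inverted index as a dict literal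
theorem vtc_mk : pvVariantToCanon = PySem.Dict.mk
    [("contacts", "contacts"), ("persons", "contacts"), ("people", "contacts"),
     ("companies", "companies"), ("organizations", "companies"),
     ("accounts", "companies"), ("sales_accounts", "companies"),
     ("deals", "deals"), ("opportunities", "deals")] := by decide

-- pointwise agreement of A's membership tests with B's inverted-index lookup
theorem vtc_contacts (x : String) :
    (["contacts", "persons", "people"].contains x)
      = (pvVariantToCanon.get? x == some "contacts") := by
  rw [vtc_mk]
  simp only [PySem.Dict.get?_mk_cons, List.contains, List.elem_cons, List.elem_nil]
  split_ifs <;> (try simp_all) <;>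
    (cases hxa : x == "contacts" <;> cases hxb : x == "persons" <;> cases hxc : x == "people" <;>
      simp_all [beq_iff_eq, PySem.Dict.get?])

theorem vtc_companies (x : String) :
    (["companies", "organizations", "accounts", "sales_accounts"].contains x)
      = (pvVariantToCanon.get? x == some "companies") := by
  rw [vtc_mk]
  simp only [PySem.Dict.get?_mk_cons, List.contains, List.elem_cons, List.elem_nil]
  split_ifs <;> (try simp_all) <;>
    (cases hxa : x == "companies" <;> cases hxb : x == "organizations" <;>
     cases hxc : x == "accounts" <;> cases hxd : x == "sales_accounts" <;>
      simp_all [beq_iff_eq, PySem.Dict.get?])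

theorem vtc_deals (x : String) :
    (["deals", "opportunities"].contains x)
      = (pvVariantToCanon.get? x == some "deals") := by
  rw [vtc_mk]
  simp only [PySem.Dict.get?_mk_cons, List.contains, List.elem_cons, List.elem_nil]
  split_ifs <;> (try simp_all) <;>
    (cases hxa : x == "deals" <;> cases hxb : x == "opportunities" <;>
      simp_all [beq_iff_eq, PySem.Dict.get?])

-- a string the inverted index matches is nonempty (so Python's truthiness = isSome)
theorem vtc_nonempty (t c : String)
    (h : pvVariantToCanon.get? (PySem.Str.lower t) = some c) : t.isEmpty = false := by
  cases ht : t.isEmpty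
  · rfl
  · exfalso
    have : t = "" := String.isEmpty_iff.mp ht
    subst this
    rw [show PySem.Str.lower "" = "" from rfl, vtc_mk] at h
    simp [PySem.Dict.get?] at h

-- invariant of B's bucket loop: lookup = first-match state
theorem bucket_aux (ts : List String) (b : PySem.Dict String String) (c : String) :
    (ts.foldl (fun b t =>
      match pvVariantToCanon.get? (PySem.Str.lower t) with
      | some c' => if b.contains c' then b else b.insert c' t
      | none => b) b).get? c
      = ((b.get? c).orElse (fun _ =>
          ts.find? (fun t => pvVariantToCanon.get? (PySem.Str.lower t) == some c))) := by
  induction ts generalizing b with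
  | nil => cases h : b.get? c <;> simp [List.foldl, h, Option.orElse]
  | cons t ts ih =>
    simp only [List.foldl, List.find?]
    cases h : pvVariantToCanon.get? (PySem.Str.lower t) with
    | none => simp [ih]
    | some c' =>
      by_cases hc : c' = c
      · subst hc
        simp only [beq_self_eq_true]
        cases hb : b.contains c'
        · rw [if_neg Bool.false_ne_true]
          rw [ih]
          rw [PySem.Dict.get?_insert_self]
          have hbn : b.get? c' = none := by
            rw [PySem.Dict.contains_eq_isSome_get?] at hb
            cases hg : b.get? c' <;> simp [hg] at hb ⊢
          simp [hbn, Option.orElse]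
        · rw [if_pos rfl]
          rw [ih]
          have hbs : ∃ v, b.get? c' = some v := by
            rw [PySem.Dict.contains_eq_isSome_get?] at hb
            cases hg : b.get? c' <;> simp [hg] at hb ⊢
          obtain ⟨v, hv⟩ := hbs
          simp [hv, Option.orElse]
      · have hne : (some c' == some c) = false := by simp [hc]
        simp only [hne]
        cases hb : b.contains c'
        · rw [if_neg Bool.false_ne_true]
          rw [ih, PySem.Dict.get?_insert_of_ne (hne := Ne.symm hc)]
        · rw [if_pos rfl, ih]

-- bucket lookup = first match in the input list
theorem bucket_get? (ts : List String) (c : String) :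
    (pvBucket ts).get? c
      = ts.find? (fun t => pvVariantToCanon.get? (PySem.Str.lower t) == some c) := by
  rw [pvBucket, bucket_aux]
  simp [PySem.Dict.get?_empty, Option.orElse]

theorem find?_congr' (p q : String → Bool) (l : List String) (h : ∀ a, p a = q a) :
    l.find? p = l.find? q := by
  induction l with
  | nil => rfl
  | cons a l ih => simp [List.find?, h a, ih]

theorem find?_nonempty (l : List String) (c : String) (s : String)
    (h : l.find? (fun t => pvVariantToCanon.get? (PySem.Str.lower t) == some c) = some s) :
    s.isEmpty = false := by
  have hp := List.find?_some h
  exact vtc_nonempty s c (by simpa using hp)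

theorem final (src_types dst_types : List String) :
    build_type_map_py src_types dst_types = build_type_map_py_alt src_types dst_types := by
  unfold build_type_map_py build_type_map_py_alt pvAliasesA pvCanonicals
  simp only [List.foldl]
  rw [bucket_get?, bucket_get?, bucket_get?, bucket_get?, bucket_get?, bucket_get?]
  rw [find?_congr' _ _ src_types (fun t => vtc_contacts (PySem.Str.lower t)),
      find?_congr' _ _ dst_types (fun t => vtc_contacts (PySem.Str.lower t)),
      find?_congr' _ _ src_types (fun t => vtc_companies (PySem.Str.lower t)),
      find?_congr' _ _ dst_types (fun t => vtc_companies (PySem.Str.lower t)),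
      find?_congr' _ _ src_types (fun t => vtc_deals (PySem.Str.lower t)),
      find?_congr' _ _ dst_types (fun t => vtc_deals (PySem.Str.lower t))]
  generalize hc1 : List.find? (fun t => pvVariantToCanon.get? (PySem.Str.lower t) == some "contacts") src_types = o1
  generalize hc2 : List.find? (fun t => pvVariantToCanon.get? (PySem.Str.lower t) == some "contacts") dst_types = o2
  generalize hc3 : List.find? (fun t => pvVariantToCanon.get? (PySem.Str.lower t) == some "companies") src_types = o3
  generalize hc4 : List.find? (fun t => pvVariantToCanon.get? (PySem.Str.lower t) == some "companies") dst_types = o4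
  generalize hc5 : List.find? (fun t => pvVariantToCanon.get? (PySem.Str.lower t) == some "deals") src_types = o5
  generalize hc6 : List.find? (fun t => pvVariantToCanon.get? (PySem.Str.lower t) == some "deals") dst_types = o6
  have n1 : ∀ s, o1 = some s → s.isEmpty = false := fun s hs => find?_nonempty _ _ _ (hc1.trans hs)
  have n2 : ∀ s, o2 = some s → s.isEmpty = false := fun s hs => find?_nonempty _ _ _ (hc2.trans hs)
  have n3 : ∀ s, o3 = some s → s.isEmpty = false := fun s hs => find?_nonempty _ _ _ (hc3.trans hs)
  have n4 : ∀ s, o4 = some s → s.isEmpty = false := fun s hs => find?_nonempty _ _ _ (hc4.trans hs)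
  have n5 : ∀ s, o5 = some s → s.isEmpty = false := fun s hs => find?_nonempty _ _ _ (hc5.trans hs)
  have n6 : ∀ s, o6 = some s → s.isEmpty = false := fun s hs => find?_nonempty _ _ _ (hc6.trans hs)
  rcases o1 with _ | s1 <;> rcases o2 with _ | d1 <;> rcases o3 with _ | s2 <;>
    rcases o4 with _ | d2 <;> rcases o5 with _ | s3 <;> rcases o6 with _ | d3 <;>
    simp_all

-- ===== VERDICT (by name: the statement is the Claim_ definition above) =====
theorem build_type_map_py_spec : Claim_equal_build_type_map_py := by
  intro src_types dst_types _
  exact final src_types dst_types
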